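-- pv_equiv track=rewrite | github.com/kei-nan/NLPCourse | utils/preprocessing.py | remove_header_and_footer
-- ===== SOURCE A (Python) =====
-- def remove_header_and_footer(lines, start_barrier='*** START OF THIS PROJECT', end_barrier='*** END OF THIS PROJECT'):
--     header_and_footer_positions = []
--     start = 0
--     end = len(lines)
--     for pos, line in enumerate(lines):
--         if line.startswith(start_barrier):
--             start = pos
--         elif line.startswith(end_barrier):
--             end = pos
--         else:
--             continue
--     lines = lines[start + 1:end]
--     return lines
-- ===== SOURCE B (Python) =====
-- def remove_header_and_footer(lines, start_barrier='*** START OF THIS PROJECT', end_barrier='*** END OF THIS PROJECT'):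
--     start = 0
--     end = len(lines)
--     for pos in range(len(lines) - 1, -1, -1):
--         if lines[pos].startswith(start_barrier):
--             start = pos
--             break
--     for pos in range(len(lines) - 1, -1, -1):
--         if lines[pos].startswith(end_barrier):
--             end = pos
--             break
--     return lines[start + 1:end]
-- ===== Notes on version B (the rewrite author's own statement) =====
-- stated objective: alternative
-- what changed: Replaces A's single forward accumulating pass (last update wins, with elif precedence) by two independent early-terminating reverse scans that locate the last start-barrier line and the last end-barrier line, then slice; Pre_ excludes inputs where some line starts with both barriers, on which A's elif precedence (start barrier shadows end barrier on that line) is an accidental tie-break.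
-- outside the precondition, e.g. on remove_header_and_footer(['p', 'ab', 'q'], 'a', 'ab'): A returns ['q'], B returns []
import Mathlib
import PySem

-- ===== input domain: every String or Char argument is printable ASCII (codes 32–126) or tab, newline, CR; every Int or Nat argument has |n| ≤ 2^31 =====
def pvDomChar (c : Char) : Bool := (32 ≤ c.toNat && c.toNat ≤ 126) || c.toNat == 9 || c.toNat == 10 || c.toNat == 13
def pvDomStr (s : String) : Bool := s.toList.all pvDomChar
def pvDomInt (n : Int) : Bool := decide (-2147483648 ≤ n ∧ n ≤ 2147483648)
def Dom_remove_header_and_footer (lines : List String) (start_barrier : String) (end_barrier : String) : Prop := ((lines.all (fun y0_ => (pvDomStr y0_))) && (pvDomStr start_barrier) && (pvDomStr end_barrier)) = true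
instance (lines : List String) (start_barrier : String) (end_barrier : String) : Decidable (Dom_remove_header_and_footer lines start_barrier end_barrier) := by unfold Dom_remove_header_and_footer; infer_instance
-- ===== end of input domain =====

-- B replaces A's forward accumulating pass with two independent early-terminating reverse scans; alternative decomposition, same cost.

-- ===== PORT A =====
-- forward loop over enumerate(lines), last matching position wins (elif: start-barrier match shadows end-barrier)
def remove_header_and_footer (lines : List String) (start_barrier : String) (end_barrier : String) : List String :=
  let se := (PySem.List.enumerate lines).foldl
    (fun (se : Int × Int) pl =>
      if PySem.Str.startswith pl.2 start_barrier then (pl.1, se.2)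
      else if PySem.Str.startswith pl.2 end_barrier then (se.1, pl.1)
      else se)
    (0, (lines.length : Int))
  PySem.List.slice lines (some (se.1 + 1)) (some se.2)

-- ===== PORT B =====
-- reverse scan with break: first (index, line) from the end whose line starts with the barrier; default d when none
def pvRevFind (ps : List (Int × String)) (barrier : String) (d : Int) : Int :=
  match ps with
  | [] => d
  | (i, l) :: rest => if PySem.Str.startswith l barrier then i else pvRevFind rest barrier d

def remove_header_and_footer_alt (lines : List String) (start_barrier : String) (end_barrier : String) : List String :=
  let ps := (PySem.List.enumerate lines).reverse
  let start := pvRevFind ps start_barrier 0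
  let «end» := pvRevFind ps end_barrier (lines.length : Int)
  PySem.List.slice lines (some (start + 1)) (some «end»)

-- ===== PRECONDITION & SPEC =====
-- Pre_ excludes inputs where some line starts with BOTH barriers: there A's elif gives the start
-- barrier precedence on that line, an accidental tie-break of A's branch order that two independent
-- searches (B) resolve the other way; either value is defensible on that corner.
def Pre_remove_header_and_footer (lines : List String) (start_barrier : String) (end_barrier : String) : Prop :=
  ∀ l ∈ lines, ¬(PySem.Str.startswith l start_barrier = true ∧ PySem.Str.startswith l end_barrier = true)
instance (lines : List String) (start_barrier : String) (end_barrier : String) : Decidable (Pre_remove_header_and_footer lines start_barrier end_barrier) := by unfold Pre_remove_header_and_footer; infer_instance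

def pvWitness_remove_header_and_footer : List String × String × String :=
  (["intro", "s: start", "body", "e: end", "outro"], "s:", "e:")

def Spec_remove_header_and_footer (lines : List String) (start_barrier : String) (end_barrier : String) (out : List String) : Prop := out = remove_header_and_footer_alt lines start_barrier end_barrier
instance (lines : List String) (start_barrier : String) (end_barrier : String) (out : List String) : Decidable (Spec_remove_header_and_footer lines start_barrier end_barrier out) := by unfold Spec_remove_header_and_footer; infer_instance

-- ===== CLAIM (what is proved, stated in full; the proofs are below) =====
def Claim_equal_remove_header_and_footer : Prop := ∀ (lines : List String) (start_barrier : String) (end_barrier : String), Dom_remove_header_and_footer lines start_barrier end_barrier → Pre_remove_header_and_footer lines start_barrier end_barrier → Spec_remove_header_and_footer lines start_barrier end_barrier (remove_header_and_footer lines start_barrier end_barrier)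

-- ===== LEMMAS AND PROOFS =====

-- when no pair's line matches both barriers, the forward fold equals the pair of reverse first-finds
theorem foldl_eq_revFind (ps : List (Int × String)) (sb eb : String) (s0 e0 : Int)
    (h : ∀ p ∈ ps, ¬(PySem.Str.startswith p.2 sb = true ∧ PySem.Str.startswith p.2 eb = true)) :
    ps.foldl
      (fun (se : Int × Int) pl =>
        if PySem.Str.startswith pl.2 sb then (pl.1, se.2)
        else if PySem.Str.startswith pl.2 eb then (se.1, pl.1)
        else se)
      (s0, e0)
    = (pvRevFind ps.reverse sb s0, pvRevFind ps.reverse eb e0) := by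
  induction ps using List.reverseRecOn generalizing s0 e0 with
  | nil => simp [pvRevFind]
  | append_singleton xs p ih =>
      rcases p with ⟨i, l⟩
      rw [List.foldl_append, ih s0 e0 (fun q hq => h q (List.mem_append_left _ hq))]
      have hl := h (i, l) (by simp)
      simp only [List.foldl_cons, List.foldl_nil, List.reverse_append, List.reverse_cons,
        List.reverse_nil, List.nil_append, List.cons_append, pvRevFind]
      by_cases hs : PySem.Str.startswith l sb
      · have he : PySem.Str.startswith l eb = false := by
          cases heq : PySem.Str.startswith l eb
          · rfl
          · exact absurd ⟨hs, heq⟩ hl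
        rw [PySem.Str.startswith_eq] at hs he
        simp [hs, he]
      · by_cases he : PySem.Str.startswith l eb <;>
          rw [PySem.Str.startswith_eq] at hs he <;> simp [hs, he]

-- ===== VERDICT (by name: the statement is the Claim_ definition above) =====
theorem remove_header_and_footer_spec : Claim_equal_remove_header_and_footer := by
  intro lines sb eb _ hpre
  show _ = _
  unfold remove_header_and_footer remove_header_and_footer_alt
  rw [foldl_eq_revFind]
  intro p hp
  apply hpre
  rcases (PySem.List.mem_enumerate_iff _ _ _).mp hp with ⟨k, hk, rfl⟩
  exact List.getElem_mem hk
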